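-- pv_equiv track=rewrite | github.com/maryyang1234/hello-world | 删除K个字符后.py | minStringValue
-- ===== SOURCE A (Python) =====
-- from collections import Counter
-- from queue import PriorityQueue
--
-- def minStringValue(str,k):
--
--     if len(str)<=k:
--          return 0
--
--     d_str = Counter(str)
--
--     q = PriorityQueue()
--     for key in d_str.keys():
--         q.put(-d_str[key])
--
--     while k>0:
--         temp = q.get()
--         temp = temp+1
--         q.put(temp,temp)
--         k=k-1
--
--     result = 0
--     while not q.empty():
--         temp = q.get()
--         temp = temp*(-1)
--         result +=temp*temp
--
--     return result
-- ===== SOURCE B (Python) =====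
-- from collections import Counter
--
-- def minStringValue(str, k):
--     # Water-fill: sort frequencies descending, lower the top group in bulk
--     # level by level until k removals are spent, then finish with divmod.
--     rem = k if k > 0 else 0
--     if len(str) <= rem:
--         return 0
--     freqs = sorted(Counter(str).values(), reverse=True)
--     g = 0                # size of the top group already leveled
--     level = freqs[0]     # common level of that group
--     for f in freqs:
--         drop = g * (level - f)
--         if drop > rem:
--             break
--         rem -= drop
--         level = f
--         g += 1
--     q, r = divmod(rem, g)
--     level -= q
--     res = r * (level - 1) ** 2 + (g - r) * level ** 2
--     for f in freqs[g:]: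
--         res += f * f
--     return res
-- ===== Notes on version B (the rewrite author's own statement) =====
-- stated objective: faster
-- what changed: Replaces A's priority-queue loop that removes one character per iteration (k heap gets/puts) by a water-fill: sort the frequencies descending, lower the top group level by level in bulk, and finish the leftover removals with one divmod, so the work no longer depends on k.
import Mathlib
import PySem

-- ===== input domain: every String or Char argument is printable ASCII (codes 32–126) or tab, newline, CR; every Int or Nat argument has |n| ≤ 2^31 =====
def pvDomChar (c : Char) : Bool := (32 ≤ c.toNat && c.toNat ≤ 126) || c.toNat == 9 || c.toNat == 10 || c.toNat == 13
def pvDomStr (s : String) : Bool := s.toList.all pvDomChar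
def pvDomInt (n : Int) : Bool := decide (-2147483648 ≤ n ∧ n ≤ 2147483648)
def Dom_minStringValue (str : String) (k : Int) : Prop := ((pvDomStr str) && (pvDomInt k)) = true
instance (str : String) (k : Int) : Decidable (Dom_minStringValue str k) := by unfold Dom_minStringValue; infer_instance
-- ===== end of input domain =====

-- B replaces A's one-removal-at-a-time priority-queue loop (O(k log m) puts/gets) by a
-- water-fill over the sorted frequency list (O(n log n), independent of k).

-- ===== PORT A =====
-- 'while k>0: temp=q.get(); q.put(temp+1)' — PriorityQueue modelled as a list, get = pop first minimum.
-- (q.get() on an empty queue would block forever in Python; that state is unreachable, the port keeps q.)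
def pvALoop (q : List Int) (k : Int) : List Int :=
  if 0 < k then
    match PySem.List.min? q (fun x => x) with
    | some temp => pvALoop ((temp + 1) :: q.erase temp) (k - 1)
    | none => q
  else q
termination_by k.toNat
decreasing_by all_goals omega

-- 'while not q.empty(): temp = q.get()*(-1); result += temp*temp'
def pvADrain (q : List Int) (result : Int) : Int :=
  match h : PySem.List.min? q (fun x => x) with
  | some temp => pvADrain (q.erase temp) (result + (temp * (-1)) * (temp * (-1)))
  | none => result
termination_by q.length
decreasing_by
  have hm := PySem.List.min?_mem h
  have := List.length_erase_of_mem hm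
  have := List.length_pos_of_mem hm
  omega

def minStringValue (str : String) (k : Int) : Int :=
  if PySem.Str.len str ≤ k then 0
  else
    let d := PySem.Dict.counter str.toList
    let q := d.keys.foldl (fun q key => (-(PySem.Dict.getD d key 0)) :: q) ([] : List Int)
    pvADrain (pvALoop q k) 0

-- ===== PORT B =====
-- the scan 'for f in freqs: …' with break, carrying (rem, level, g)
def pvBScan : List Int → Int → Int → Int → Int × Int × Int
  | [], rem, level, g => (rem, level, g)
  | f :: t, rem, level, g =>
    let drop := g * (level - f)
    if drop > rem then (rem, level, g)
    else pvBScan t (rem - drop) f (g + 1)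

def minStringValue_alt (str : String) (k : Int) : Int :=
  let rem := if 0 < k then k else 0
  if PySem.Str.len str ≤ rem then 0
  else
    let freqs := PySem.List.sorted (PySem.Dict.counter str.toList).values (fun x => x) true
    match pvBScan freqs rem (PySem.List.pyGetD freqs 0 0) 0 with
    | (rem', lvl, g) =>
      let q := PySem.Int.floordiv rem' g
      let r := PySem.Int.mod rem' g
      let level := lvl - q
      let res := r * (level - 1) * (level - 1) + (g - r) * level * level
      (PySem.List.slice freqs (some g) none).foldl (fun res f => res + f * f) res

-- ===== PRECONDITION & SPEC =====
def Spec_minStringValue (str : String) (k : Int) (out : Int) : Prop := out = minStringValue_alt str k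
instance (str : String) (k : Int) (out : Int) : Decidable (Spec_minStringValue str k out) := by unfold Spec_minStringValue; infer_instance

-- ===== CLAIM (what is proved, stated in full; the proofs are below) =====
def Claim_equal_minStringValue : Prop := ∀ (str : String) (k : Int), Dom_minStringValue str k → Spec_minStringValue str k (minStringValue str k)

-- ===== LEMMAS AND PROOFS =====

-- sum of squares
def pvSq (l : List Int) : Int := (l.map (fun x => x * x)).sum

-- decrement one maximal element
def pvDecMax (l : List Int) : List Int :=
  match PySem.List.max? l (fun x => x) with
  | some m => (m - 1) :: l.erase m
  | none => l

def pvIter (l : List Int) : Nat → List Int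
  | 0 => l
  | n + 1 => pvIter (pvDecMax l) n

def pvG (l : List Int) (n : Nat) : Int := pvSq (pvIter l n)

theorem pvSq_perm {l l' : List Int} (h : l.Perm l') : pvSq l = pvSq l' := by
  unfold pvSq; exact List.Perm.sum_eq (List.Perm.map _ h)

theorem pvDecMax_perm {l l' : List Int} (h : l.Perm l') : (pvDecMax l).Perm (pvDecMax l') := by
  unfold pvDecMax
  rcases h1 : PySem.List.max? l (fun x => x) with _ | m
  · have hl : l = [] := by
      have := (PySem.List.max?_eq_none_iff (xs := l) (key := fun x => x)).mp h1
      exact this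
    subst hl
    have hl' : l' = [] := h.symm.eq_nil
    subst hl'
    simp [PySem.List.max?]
  · have hm := PySem.List.max?_mem h1
    have hmax := PySem.List.max?_isMax h1
    rcases h2 : PySem.List.max? l' (fun x => x) with _ | m'
    · exfalso
      have hl' : l' = [] := (PySem.List.max?_eq_none_iff (xs := l') (key := fun x => x)).mp h2
      subst hl'
      exact (List.not_mem_nil) (h.mem_iff.mp hm)
    · have hm' := PySem.List.max?_mem h2
      have hmax' := PySem.List.max?_isMax h2
      have hmm : m = m' :=
        le_antisymm (hmax' m (h.mem_iff.mp hm)) (hmax m' (h.mem_iff.mpr hm'))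
      subst hmm
      exact (h.erase m).cons (m - 1)

theorem pvIter_perm {l l' : List Int} (h : l.Perm l') :
    ∀ n, (pvIter l n).Perm (pvIter l' n) := by
  intro n
  induction n generalizing l l' with
  | zero => exact h
  | succ n ih => exact ih (pvDecMax_perm h)

theorem pvG_perm {l l' : List Int} (h : l.Perm l') (n : Nat) : pvG l n = pvG l' n :=
  pvSq_perm (pvIter_perm h n)

theorem pvIter_nil (n : Nat) : pvIter [] n = [] := by
  induction n with
  | zero => rfl
  | succ n ih => simpa [pvIter, pvDecMax, PySem.List.max?] using ih

theorem pvADrain_eq (q : List Int) (acc : Int) : pvADrain q acc = acc + pvSq q := by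
  fun_induction pvADrain with
  | case1 q acc temp h ih =>
    have hm := PySem.List.min?_mem h
    rw [ih]
    have hq : pvSq q = pvSq (temp :: q.erase temp) := pvSq_perm (List.perm_cons_erase hm)
    rw [hq]
    simp [pvSq]
    ring
  | case2 q acc h =>
    have hq : q = [] := (PySem.List.min?_eq_none_iff (xs := q) (key := fun x => x)).mp h
    subst hq
    simp [pvSq]

theorem pvALoop_perm (n : Nat) (k : Int) (hk : k.toNat = n) (q l : List Int)
    (h : q.Perm (l.map (fun x => -x))) :
    (pvALoop q k).Perm ((pvIter l n).map (fun x => -x)) := by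
  induction n generalizing k q l with
  | zero =>
    rw [pvALoop, if_neg (by omega)]
    exact h
  | succ n ih =>
    have hk0 : 0 < k := by omega
    rw [pvALoop, if_pos hk0]
    rcases h1 : PySem.List.min? q (fun x => x) with _ | temp
    · have hq : q = [] := (PySem.List.min?_eq_none_iff (xs := q) (key := fun x => x)).mp h1
      subst hq
      have hl : l.map (fun x => -x) = [] := h.symm.eq_nil
      have hl' : l = [] := by simpa using hl
      subst hl'
      simp [pvIter_nil]
    · have htm := PySem.List.min?_mem h1
      have htmin := PySem.List.min?_isMin h1
      rcases h2 : PySem.List.max? l (fun x => x) with _ | m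
      · exfalso
        have hl : l = [] := (PySem.List.max?_eq_none_iff (xs := l) (key := fun x => x)).mp h2
        subst hl
        have : q = [] := h.eq_nil
        subst this
        exact (List.not_mem_nil) htm
      · have hmm := PySem.List.max?_mem h2
        have hmmax := PySem.List.max?_isMax h2
        -- temp = -m
        have h3 : -m ∈ q := h.mem_iff.mpr (List.mem_map_of_mem hmm)
        have h4 : temp ≤ -m := htmin (-m) h3
        obtain ⟨x, hx, hxe⟩ := List.mem_map.mp (h.mem_iff.mp htm)
        have h5 : x ≤ m := hmmax x hx
        have h6 : temp = -m := by omega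
        subst h6
        have hiter : pvIter l (n + 1) = pvIter (pvDecMax l) n := rfl
        rw [hiter]
        refine ih (k - 1) (by omega) _ (pvDecMax l) ?_
        have hdm : pvDecMax l = (m - 1) :: l.erase m := by simp [pvDecMax, h2]
        rw [hdm]
        have herase : (q.erase (-m)).Perm ((l.erase m).map (fun x => -x)) := by
          have h7 := h.erase (-m)
          rwa [show (List.map (fun x : Int => -x) l).erase (-m)
              = (l.erase m).map (fun x : Int => -x) from
            (List.map_erase (f := fun x : Int => -x)
              (fun a b hab => by simpa using hab) (l := l) (a := m)).symm] at h7
        have : ((-m + 1) :: q.erase (-m)).Perm ((-m + 1) :: (l.erase m).map (fun x => -x)) :=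
          herase.cons (-m + 1)
        simpa [show (1 : Int) - m = -m + 1 by ring] using this

theorem pvSq_map_neg (l : List Int) : pvSq (l.map (fun x => -x)) = pvSq l := by
  unfold pvSq
  rw [List.map_map]
  congr 1
  apply List.map_congr_left
  intro x _
  show -x * -x = x * x
  ring

theorem pvSq_replicate_append (g : Nat) (x : Int) (t : List Int) :
    pvSq (List.replicate g x ++ t) = (g : Int) * (x * x) + pvSq t := by
  simp [pvSq, List.sum_replicate]

theorem pvDecMax_eq (l : List Int) (v : Int) (hv : v ∈ l) (hmax : ∀ x ∈ l, x ≤ v) :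
    pvDecMax l = (v - 1) :: l.erase v := by
  unfold pvDecMax
  rcases h1 : PySem.List.max? l (fun x => x) with _ | m
  · exact absurd ((PySem.List.max?_eq_none_iff (xs := l) (key := fun x => x)).mp h1 ▸ hv)
      List.not_mem_nil
  · have hm := PySem.List.max?_mem h1
    have hmm := PySem.List.max?_isMax h1
    have : m = v := le_antisymm (hmax m hm) (hmm v hv)
    rw [this]

-- one whole level: lower a top group of a elements by one, spending a removals
theorem pvLvl1 (a : Nat) : ∀ (n : Nat) (level : Int) (t : List Int), a ≤ n →
    (∀ x ∈ t, x ≤ level - 1) →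
    pvG (List.replicate a level ++ t) n = pvG (List.replicate a (level - 1) ++ t) (n - a) := by
  induction a with
  | zero => intro n level t _ _; simp
  | succ a ih =>
    intro n level t han ht
    rcases n with _ | n
    · omega
    have hstep : pvG (List.replicate (a + 1) level ++ t) (n + 1)
        = pvG (pvDecMax (List.replicate (a + 1) level ++ t)) n := rfl
    rw [hstep]
    have hdm : pvDecMax (List.replicate (a + 1) level ++ t)
        = (level - 1) :: (List.replicate a level ++ t) := by
      rw [pvDecMax_eq _ level]
      · rw [List.replicate_succ, List.cons_append, List.erase_cons_head]
      · exact List.mem_append_left _ (List.mem_replicate.mpr ⟨by omega, rfl⟩)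
      · intro x hx
        rcases List.mem_append.mp hx with hx | hx
        · exact le_of_eq (List.eq_of_mem_replicate hx)
        · linarith [ht x hx]
    rw [hdm]
    have hperm : ((level - 1) :: (List.replicate a level ++ t)).Perm
        (List.replicate a level ++ ((level - 1) :: t)) := List.perm_middle.symm
    rw [pvG_perm hperm]
    rw [ih n level ((level - 1) :: t) (by omega)
      (by intro x hx
          have hx' : x = level - 1 ∨ x ∈ t := by simpa using hx
          rcases hx' with rfl | hx'
          · exact le_refl _
          · exact ht x hx')]
    have : List.replicate a (level - 1) ++ (level - 1) :: t
        = List.replicate (a + 1) (level - 1) ++ t := by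
      rw [List.replicate_succ', List.append_assoc]; rfl
    rw [this]
    congr 1
    omega

-- c whole levels
theorem pvLvl (c : Nat) : ∀ (g n : Nat) (level : Int) (t : List Int), 1 ≤ g →
    g * c ≤ n → (∀ x ∈ t, x ≤ level - c) →
    pvG (List.replicate g level ++ t) n
      = pvG (List.replicate g (level - c) ++ t) (n - g * c) := by
  induction c with
  | zero => intro g n level t _ _ _; simp
  | succ c ih =>
    intro g n level t hg hn ht
    have hgc : g * (c + 1) = g * c + g := by ring
    rw [pvLvl1 g n level t (by omega)
      (by intro x hx; have := ht x hx; push_cast at this ⊢; omega)]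
    rw [ih g (n - g) (level - 1) t hg (by omega)
      (by intro x hx; have := ht x hx; push_cast at this ⊢; omega)]
    have h1 : level - 1 - (c : Int) = level - ((c : Nat) + 1 : Nat) := by push_cast; ring
    rw [h1]
    congr 1
    omega

-- fewer removals than group size: r of the g elements drop by one
theorem pvSmall (r : Nat) : ∀ (g : Nat) (level : Int) (t : List Int), r < g →
    (∀ x ∈ t, x ≤ level - 1) →
    pvG (List.replicate g level ++ t) r
      = (r : Int) * ((level - 1) * (level - 1)) + ((g - r : Nat) : Int) * (level * level)
        + pvSq t := by
  induction r with
  | zero =>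
    intro g level t _ _
    show pvSq (List.replicate g level ++ t) = _
    rw [pvSq_replicate_append]
    push_cast [Nat.sub_zero]
    ring
  | succ r ih =>
    intro g level t hrg ht
    rcases g with _ | g
    · omega
    have hstep : pvG (List.replicate (g + 1) level ++ t) (r + 1)
        = pvG (pvDecMax (List.replicate (g + 1) level ++ t)) r := rfl
    rw [hstep]
    have hdm : pvDecMax (List.replicate (g + 1) level ++ t)
        = (level - 1) :: (List.replicate g level ++ t) := by
      rw [pvDecMax_eq _ level]
      · rw [List.replicate_succ, List.cons_append, List.erase_cons_head]
      · exact List.mem_append_left _ (List.mem_replicate.mpr ⟨by omega, rfl⟩)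
      · intro x hx
        rcases List.mem_append.mp hx with hx | hx
        · exact le_of_eq (List.eq_of_mem_replicate hx)
        · linarith [ht x hx]
    rw [hdm, pvG_perm ((List.perm_middle
      (l₁ := List.replicate g level) (l₂ := t) (a := level - 1)).symm)]
    rw [ih g level ((level - 1) :: t) (by omega)
      (by intro x hx
          have hx' : x = level - 1 ∨ x ∈ t := by simpa using hx
          rcases hx' with rfl | hx'
          · exact le_refl _
          · exact ht x hx')]
    have hsq : pvSq ((level - 1) :: t) = (level - 1) * (level - 1) + pvSq t := by
      simp [pvSq]
    rw [hsq]
    have h1 : ((g - r : Nat) : Int) = ((g + 1 - (r + 1) : Nat) : Int) := by omega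
    push_cast [h1] at *
    ring

-- remainder: n removals on a group of g at 'level', suffix low enough to stay untouched
theorem pvRem (n g : Nat) (level : Int) (t : List Int) (hg : 1 ≤ g)
    (ht : ∀ x ∈ t, x ≤ level - (n / g : Nat) - 1) :
    pvG (List.replicate g level ++ t) n
      = ((n % g : Nat) : Int) * ((level - (n / g : Nat) - 1) * (level - (n / g : Nat) - 1))
        + ((g - n % g : Nat) : Int) * ((level - (n / g : Nat)) * (level - (n / g : Nat)))
        + pvSq t := by
  have hmod : n % g < g := Nat.mod_lt _ (by omega)
  have hdiv : g * (n / g) + n % g = n := Nat.div_add_mod n g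
  have hsub : n - g * (n / g) = n % g := by omega
  rw [pvLvl (n / g) g n level t hg (by omega)
    (by intro x hx; have := ht x hx; omega)]
  rw [hsub]
  rw [pvSmall (n % g) g (level - (n / g : Nat)) t hmod
    (by intro x hx; have := ht x hx; omega)]

theorem pvBScan_g_le : ∀ (t : List Int) (rem level g : Int),
    g ≤ (pvBScan t rem level g).2.2 := by
  intro t
  induction t with
  | nil => intro rem level g; simp [pvBScan]
  | cons f t ih =>
    intro rem level g
    rw [pvBScan]
    split
    · simp
    · exact le_trans (by omega) (ih (rem - g * (level - f)) f (g + 1))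

theorem pvScan : ∀ (t : List Int) (g level rem rem' lvl g' : Int),
    pvBScan t rem level g = (rem', lvl, g') → 1 ≤ g → 0 ≤ rem →
    (∀ x ∈ t, x ≤ level) → t.Pairwise (fun a b => b ≤ a) →
    PySem.Int.mod rem' g' * ((lvl - PySem.Int.floordiv rem' g' - 1) * (lvl - PySem.Int.floordiv rem' g' - 1))
      + (g' - PySem.Int.mod rem' g') * ((lvl - PySem.Int.floordiv rem' g') * (lvl - PySem.Int.floordiv rem' g'))
      + pvSq (t.drop (g' - g).toNat)
    = pvG (List.replicate g.toNat level ++ t) rem.toNat := by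
  intro t
  induction t with
  | nil =>
    intro g level rem rem' lvl g' heq hg hrem _ _
    simp only [pvBScan, Prod.mk.injEq] at heq
    obtain ⟨rfl, rfl, rfl⟩ := heq
    have hmodlt : rem.toNat % g.toNat < g.toNat := Nat.mod_lt _ (by omega)
    have hmodc : PySem.Int.mod rem g = ((rem.toNat % g.toNat : Nat) : Int) := by
      conv_lhs => rw [show rem = ((rem.toNat : Nat) : Int) from by omega,
        show g = ((g.toNat : Nat) : Int) from by omega]
      rw [PySem.Int.mod_natCast]
    have hdivc : PySem.Int.floordiv rem g = ((rem.toNat / g.toNat : Nat) : Int) := by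
      conv_lhs => rw [show rem = ((rem.toNat : Nat) : Int) from by omega,
        show g = ((g.toNat : Nat) : Int) from by omega]
      rw [PySem.Int.floordiv_natCast]
    rw [pvRem rem.toNat g.toNat level [] (by omega) (by intro x hx; cases hx)]
    rw [hmodc, hdivc, List.drop_nil]
    push_cast [Nat.cast_sub (le_of_lt hmodlt)]
    have hgg : ((g.toNat : Nat) : Int) = g := Int.toNat_of_nonneg (by omega)
    rw [hgg]
  | cons f t ih =>
    intro g level rem rem' lvl g' heq hg hrem ht hpw
    have hf : f ≤ level := ht f (List.mem_cons_self)
    obtain ⟨hpf, hpt⟩ := List.pairwise_cons.mp hpw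
    simp only [pvBScan] at heq
    by_cases hbr : g * (level - f) > rem
    · rw [if_pos hbr] at heq
      simp only [Prod.mk.injEq] at heq
      obtain ⟨rfl, rfl, rfl⟩ := heq
      have hmodlt : rem.toNat % g.toNat < g.toNat := Nat.mod_lt _ (by omega)
      have hmodc : PySem.Int.mod rem g = ((rem.toNat % g.toNat : Nat) : Int) := by
        conv_lhs => rw [show rem = ((rem.toNat : Nat) : Int) from by omega,
          show g = ((g.toNat : Nat) : Int) from by omega]
        rw [PySem.Int.mod_natCast]
      have hdivc : PySem.Int.floordiv rem g = ((rem.toNat / g.toNat : Nat) : Int) := by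
        conv_lhs => rw [show rem = ((rem.toNat : Nat) : Int) from by omega,
          show g = ((g.toNat : Nat) : Int) from by omega]
        rw [PySem.Int.floordiv_natCast]
      have hQ : ((rem.toNat / g.toNat : Nat) : Int) < level - f := by
        have h1 : (rem.toNat / g.toNat) * g.toNat ≤ rem.toNat := Nat.div_mul_le_self _ _
        have h2 : ((rem.toNat / g.toNat : Nat) : Int) * ((g.toNat : Nat) : Int) ≤ rem := by
          exact_mod_cast le_trans (Int.ofNat_le.mpr h1) (by omega)
        have hgg : ((g.toNat : Nat) : Int) = g := Int.toNat_of_nonneg (by omega)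
        rw [hgg] at h2
        have h3 : ((rem.toNat / g.toNat : Nat) : Int) * g < (level - f) * g := by
          calc ((rem.toNat / g.toNat : Nat) : Int) * g ≤ rem := h2
          _ < g * (level - f) := hbr
          _ = (level - f) * g := by ring
        exact lt_of_mul_lt_mul_right h3 (by omega)
      rw [pvRem rem.toNat g.toNat level (f :: t) (by omega) (by
        intro x hx
        have hx' : x = f ∨ x ∈ t := by simpa using hx
        have hxf : x ≤ f := by
          rcases hx' with rfl | hx'
          exacts [le_refl _, hpf x hx']
        omega)]
      rw [hmodc, hdivc, show (g - g).toNat = 0 from by omega, List.drop_zero]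
      push_cast [Nat.cast_sub (le_of_lt hmodlt)]
      have hgg : ((g.toNat : Nat) : Int) = g := Int.toNat_of_nonneg (by omega)
      rw [hgg]
    · rw [if_neg hbr] at heq
      have hg' : g + 1 ≤ g' := by
        have h0 := pvBScan_g_le t (rem - g * (level - f)) f (g + 1)
        rw [heq] at h0
        exact h0
      have hIH := ih (g + 1) f (rem - g * (level - f)) rem' lvl g' heq (by omega)
        (by nlinarith) hpf hpt
      rw [show (g' - g).toNat = (g' - (g + 1)).toNat + 1 from by omega,
        List.drop_succ_cons]
      have hc : (((level - f).toNat : Nat) : Int) = level - f := Int.toNat_of_nonneg (by omega)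
      have hgg : ((g.toNat : Nat) : Int) = g := Int.toNat_of_nonneg (by omega)
      have key : ((g.toNat * (level - f).toNat : Nat) : Int) = g * (level - f) := by
        push_cast
        rw [hgg, hc]
      have hbridge : pvG (List.replicate g.toNat level ++ f :: t) rem.toNat
          = pvG (List.replicate (g + 1).toNat f ++ t) (rem - g * (level - f)).toNat := by
        rw [pvLvl (level - f).toNat g.toNat rem.toNat level (f :: t) (by omega)
          (by omega)
          (by intro x hx
              have hx' : x = f ∨ x ∈ t := by simpa using hx
              have hxf : x ≤ f := by
                rcases hx' with rfl | hx'
                exacts [le_refl _, hpf x hx']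
              omega)]
        rw [show level - (((level - f).toNat : Nat) : Int) = f from by omega]
        rw [show (g + 1).toNat = g.toNat + 1 from by omega]
        rw [show List.replicate (g.toNat + 1) f ++ t = List.replicate g.toNat f ++ f :: t from by
          rw [List.replicate_succ', List.append_assoc]
          rfl]
        congr 1
        omega
      rw [hbridge]
      exact hIH

theorem pvFoldlCons (f : Char → Int) (l : List Char) : ∀ init : List Int,
    l.foldl (fun q key => f key :: q) init = (l.map f).reverse ++ init := by
  induction l with
  | nil => intro init; simp
  | cons a l ih => intro init; simp [ih]

-- ===== VERDICT (by name: the statement is the Claim_ definition above) =====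
theorem minStringValue_spec : Claim_equal_minStringValue := by
  unfold Claim_equal_minStringValue
  intro str k _
  unfold Spec_minStringValue
  simp only [minStringValue, minStringValue_alt]
  rw [PySem.Str.len_eq]
  set s := str.toList with hs
  set rem : Int := if 0 < k then k else 0 with hremdef
  have hrem0 : 0 ≤ rem := by rw [hremdef]; split <;> omega
  have hremk : rem.toNat = k.toNat := by rw [hremdef]; split <;> omega
  by_cases h1 : (s.length : Int) ≤ k
  · rw [if_pos h1, if_pos (by rw [hremdef]; split <;> omega)]
  · rw [if_neg h1]
    set d := PySem.Dict.counter s with hd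
    have hnd : d.keys.Nodup := PySem.Dict.nodup_keys_counter s
    have hvals : d.values = d.keys.map (fun c => PySem.Dict.getD d c 0) :=
      PySem.Dict.values_eq_map_keys d hnd 0
    have hqperm : (d.keys.foldl (fun q key => (-(PySem.Dict.getD d key 0)) :: q)
        ([] : List Int)).Perm (d.values.map (fun x => -x)) := by
      rw [pvFoldlCons (fun c => -(PySem.Dict.getD d c 0)) d.keys [], List.append_nil,
        hvals, List.map_map]
      exact List.reverse_perm _
    have hA : pvADrain (pvALoop (d.keys.foldl
        (fun q key => (-(PySem.Dict.getD d key 0)) :: q) ([] : List Int)) k) 0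
        = pvG d.values k.toNat := by
      rw [pvADrain_eq]
      rw [pvSq_perm (pvALoop_perm k.toNat k rfl _ d.values hqperm)]
      rw [pvSq_map_neg]
      simp [pvG]
    by_cases h2 : (s.length : Int) ≤ rem
    · -- only possible when the string is empty (and k < 0): both sides are 0
      have hs0 : s = [] := by
        have : s.length = 0 := by omega
        exact List.eq_nil_of_length_eq_zero this
      rw [if_pos h2, hA]
      have : d.values = [] := by rw [hd, hs0]; rfl
      rw [this]
      simp [pvG, pvIter_nil, pvSq]
    · rw [if_neg h2]
      rw [hA]
      -- B side
      have hfperm : (PySem.List.sorted d.values (fun x => x) true).Perm d.values :=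
        PySem.List.sorted_perm d.values (fun x => x) true
      have hsne : s ≠ [] := by
        intro h
        rw [h] at h2
        simp at h2
        omega
      have hvne : (PySem.List.sorted d.values (fun x => x) true) ≠ [] := by
        intro h
        have hv : d.values = [] := by
          have hp := hfperm
          rw [h] at hp
          exact hp.symm.eq_nil
        have hk0 : d.keys = [] := by
          have hv2 := hvals
          rw [hv] at hv2
          exact List.map_eq_nil_iff.mp hv2.symm
        obtain ⟨c, hc⟩ := List.exists_mem_of_ne_nil s hsne
        have hck : c ∈ d.keys := by
          rw [hd, PySem.Dict.keys_counter]
          exact (PySem.Set.mem_ofList _ c).mpr hc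
        rw [hk0] at hck
        exact List.not_mem_nil hck
      rcases hfr : PySem.List.sorted d.values (fun x => x) true with _ | ⟨f0, rest⟩
      · exact absurd hfr hvne
      have hpw : (f0 :: rest).Pairwise (fun a b => b ≤ a) := by
        have := PySem.List.sorted_pairwise_rev d.values (fun x => x)
        rwa [hfr] at this
      obtain ⟨hpf, hpt⟩ := List.pairwise_cons.mp hpw
      have hget0 : PySem.List.pyGetD (f0 :: rest) 0 0 = f0 := by
        simp [pysem]
      rw [hget0]
      have hstep : pvBScan (f0 :: rest) rem f0 0 = pvBScan rest rem f0 1 := by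
        rw [pvBScan]
        rw [if_neg (by simp; omega)]
        norm_num
      rw [hstep]
      rcases hscan : pvBScan rest rem f0 1 with ⟨rem', lvl, g'⟩
      have hg'1 : 1 ≤ g' := by
        have h0 := pvBScan_g_le rest rem f0 1
        rw [hscan] at h0
        exact h0
      have hE := pvScan rest 1 f0 rem rem' lvl g' hscan (le_refl 1) hrem0 hpf hpt
      rw [show ((1 : Int)).toNat = 1 from rfl] at hE
      rw [show List.replicate 1 f0 ++ rest = f0 :: rest from rfl] at hE
      -- the trailing loop over freqs[g':]
      rw [PySem.List.slice_from _ (by omega : (0:Int) ≤ g')]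
      rw [show g'.toNat = (g' - 1).toNat + 1 from by omega, List.drop_succ_cons]
      rw [PySem.List.foldl_add _ (fun f => f * f) _]
      have hGperm : pvG (f0 :: rest) rem.toNat = pvG d.values rem.toNat := by
        rw [← hfr]
        exact pvG_perm hfperm _
      rw [← hremk, ← hGperm, ← hE]
      unfold pvSq
      ring
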